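-- pv_equiv track=rewrite | github.com/elijahManPerson/Flappy-Bird | mechanical_pipeline.py | _sentence_ids_from_tokens
-- ===== SOURCE A (Python) =====
-- from typing import Dict, Iterable, Iterator, List, Optional, Sequence, Tuple
--
-- TERMINALS = {".", "!", "?", "…", "...", "?!", "!?"}
--
-- def _sentence_ids_from_tokens(tokens: Sequence[Optional[str]]) -> Dict[int, int]:
--     sentence_ids: Dict[int, int] = {}
--     sid = 0
--     for idx, tok in enumerate(tokens):
--         if tok is None:
--             continue
--         sentence_ids[idx] = sid
--         if tok in TERMINALS:
--             sid += 1
--     return sentence_ids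
-- ===== SOURCE B (Python) =====
-- from itertools import accumulate
-- from typing import Dict, Optional, Sequence
--
-- TERMINALS = {".", "!", "?", "…", "...", "?!", "!?"}
--
-- def _sentence_ids_from_tokens(tokens: Sequence[Optional[str]]) -> Dict[int, int]:
--     # exclusive prefix-sum of terminal indicators: prefix[idx] = #terminals among tokens[0:idx]
--     prefix = list(accumulate((1 if tok in TERMINALS else 0 for tok in tokens), initial=0))
--     return {idx: prefix[idx] for idx, tok in enumerate(tokens) if tok is not None}
-- ===== Notes on version B (the rewrite author's own statement) =====
-- stated objective: alternative
-- what changed: A's single loop that interleaves dict insertion with a running sentence counter is replaced by two phases: an exclusive prefix-sum table of terminal indicators built with itertools.accumulate, then a filtered dict comprehension that only reads table[idx] for non-None tokens.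
import Mathlib
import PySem

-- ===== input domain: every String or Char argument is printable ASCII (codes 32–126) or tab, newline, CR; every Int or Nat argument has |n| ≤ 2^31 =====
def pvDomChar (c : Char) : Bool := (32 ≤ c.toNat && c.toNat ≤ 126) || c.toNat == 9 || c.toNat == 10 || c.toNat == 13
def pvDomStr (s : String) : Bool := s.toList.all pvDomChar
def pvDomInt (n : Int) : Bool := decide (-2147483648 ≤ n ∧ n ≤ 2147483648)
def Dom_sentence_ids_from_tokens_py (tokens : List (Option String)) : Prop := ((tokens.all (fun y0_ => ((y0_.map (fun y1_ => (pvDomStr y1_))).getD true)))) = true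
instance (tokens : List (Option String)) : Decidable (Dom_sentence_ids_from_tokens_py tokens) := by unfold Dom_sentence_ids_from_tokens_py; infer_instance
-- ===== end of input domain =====

-- B replaces A's single accumulating loop by an exclusive prefix-sum table plus a filtered comprehension (objective: alternative decomposition).


-- ===== PORT A =====
-- TERMINALS as a (distinct-element) list; 'tok in TERMINALS' is membership
def pvTerminals : List String := [".", "!", "?", "…", "...", "?!", "!?"]

-- the loop body of A: skip None; record (idx, sid); bump sid on a terminal
def pvStepA (st : PySem.Dict Int Int × Int) (p : Int × Option String) :
    PySem.Dict Int Int × Int :=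
  match p.2 with
  | none => st
  | some tok =>
    let d := st.1.insert p.1 st.2
    if pvTerminals.contains tok then (d, st.2 + 1) else (d, st.2)

-- literal port of A: one loop over enumerate(tokens), dict + running sid
def sentence_ids_from_tokens_py (tokens : List (Option String)) : List (Int × Int) :=
  (((PySem.List.enumerate tokens).foldl pvStepA
      ((PySem.Dict.empty : PySem.Dict Int Int), 0)).1).items

-- ===== PORT B =====
-- '1 if tok in TERMINALS else 0' (tok may be None, which is never a terminal)
def pvIsTerm (t : Option String) : Bool :=
  match t with
  | some tok => pvTerminals.contains tok
  | none => false

-- the comprehension body of B: keep non-None tokens, pairing idx with table[idx]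
def pvEmitB (table : List Int) (p : Int × Option String) : Option (Int × Int) :=
  match p.2 with
  | none => none
  | some _ => some (p.1, table.getD p.1.toNat 0)

-- literal port of B: accumulate(..., initial=0) is scanl (the exclusive prefix-sum
-- table), then the filtered comprehension over enumerate(tokens) reading table[idx]
-- (idx is a nonnegative in-range index, so getD is exact here)
def sentence_ids_from_tokens_py_alt (tokens : List (Option String)) : List (Int × Int) :=
  let table : List Int :=
    tokens.scanl (fun acc t => acc + (if pvIsTerm t then 1 else 0)) 0
  (PySem.List.enumerate tokens).filterMap (pvEmitB table)

-- ===== PRECONDITION & SPEC =====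
def Spec_sentence_ids_from_tokens_py (tokens : List (Option String)) (out : List (Int × Int)) : Prop := out = sentence_ids_from_tokens_py_alt tokens
instance (tokens : List (Option String)) (out : List (Int × Int)) : Decidable (Spec_sentence_ids_from_tokens_py tokens out) := by unfold Spec_sentence_ids_from_tokens_py; infer_instance

-- ===== CLAIM (what is proved, stated in full; the proofs are below) =====
def Claim_equal_sentence_ids_from_tokens_py : Prop := ∀ (tokens : List (Option String)), Dom_sentence_ids_from_tokens_py tokens → Spec_sentence_ids_from_tokens_py tokens (sentence_ids_from_tokens_py tokens)

-- ===== LEMMAS AND PROOFS =====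

-- common reference: the (index, sid) pairs emitted from position k with running sid s
def pvSpecList : List (Option String) → Int → Int → List (Int × Int)
  | [], _, _ => []
  | t :: ts, k, s =>
    match t with
    | none => pvSpecList ts (k + 1) s
    | some tok =>
      (k, s) :: pvSpecList ts (k + 1) (if pvTerminals.contains tok then s + 1 else s)

lemma pv_fst_mem_enumerate_ge (ts : List (Option String)) (k : Int) (p : Int × Option String)
    (hp : p ∈ PySem.List.enumerate ts k) : k ≤ p.1 := by
  have h1 : p.1 ∈ (PySem.List.enumerate ts k).map (·.1) := List.mem_map_of_mem hp
  rw [PySem.List.map_fst_enumerate] at h1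
  exact (PySem.List.mem_pyRange_one.mp h1).1

lemma pv_A_loop (ts : List (Option String)) : ∀ (k s : Int) (d : PySem.Dict Int Int),
    (∀ i : Int, k ≤ i → d.contains i = false) →
    (((PySem.List.enumerate ts k).foldl pvStepA (d, s)).1).items
      = d.items ++ pvSpecList ts k s := by
  induction ts with
  | nil => intro k s d _; simp [PySem.List.enumerate, pvSpecList]
  | cons t ts ih =>
    intro k s d hd
    rw [PySem.List.enumerate_cons, List.foldl_cons]
    cases t with
    | none =>
      show (((PySem.List.enumerate ts (k + 1)).foldl pvStepA (d, s)).1).items = _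
      rw [ih (k + 1) s d (fun i hi => hd i (by omega))]
      rfl
    | some tok =>
      have hfresh : ∀ i : Int, k + 1 ≤ i → (d.insert k s).contains i = false := by
        intro i hi
        rw [PySem.Dict.contains_insert]
        simp [hd i (by omega), show i ≠ k by omega]
      have happ : (d.insert k s).items = d.items ++ [(k, s)] :=
        PySem.Dict.items_insert_of_not_contains d s (hd k (le_refl k))
      have hstep : pvStepA (d, s) (k, some tok)
          = (d.insert k s, if pvTerminals.contains tok then s + 1 else s) := by
        simp only [pvStepA]
        split <;> rfl
      rw [hstep, ih (k + 1) _ (d.insert k s) hfresh, happ]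
      simp [pvSpecList]

lemma pv_B_loop (ts : List (Option String)) : ∀ (k s : Int),
    (PySem.List.enumerate ts k).filterMap
      (fun p =>
        match p.2 with
        | none => none
        | some _ =>
          some (p.1, (ts.scanl (fun acc t => acc + (if pvIsTerm t then 1 else 0)) s).getD (p.1 - k).toNat 0))
    = pvSpecList ts k s := by
  induction ts with
  | nil => intro k s; simp [PySem.List.enumerate, pvSpecList]
  | cons t ts ih =>
    intro k s
    rw [PySem.List.enumerate_cons, List.filterMap_cons, List.scanl_cons]
    have hshift :
        (PySem.List.enumerate ts (k + 1)).filterMap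
          (fun p =>
            match p.2 with
            | none => none
            | some _ =>
              some (p.1, (s :: ts.scanl (fun acc t => acc + (if pvIsTerm t then 1 else 0))
                  (s + (if pvIsTerm t then 1 else 0))).getD (p.1 - k).toNat 0))
        = (PySem.List.enumerate ts (k + 1)).filterMap
          (fun p =>
            match p.2 with
            | none => none
            | some _ =>
              some (p.1, (ts.scanl (fun acc t => acc + (if pvIsTerm t then 1 else 0))
                  (s + (if pvIsTerm t then 1 else 0))).getD (p.1 - (k + 1)).toNat 0)) := by
      apply List.filterMap_congr
      intro p hp
      have hk := pv_fst_mem_enumerate_ge ts (k + 1) p hp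
      cases hsnd : p.2 with
      | none => rfl
      | some tok =>
        have hidx : (p.1 - k).toNat = (p.1 - (k + 1)).toNat + 1 := by omega
        simp [hidx]
    cases t with
    | none =>
      show (PySem.List.enumerate ts (k + 1)).filterMap _ = pvSpecList (none :: ts) k s
      rw [hshift]
      have : s + (if pvIsTerm (none : Option String) then 1 else 0) = s := by
        simp [pvIsTerm]
      rw [this, ih (k + 1) s]
      rfl
    | some tok =>
      have hval : s + (if pvIsTerm (some tok) then 1 else 0)
          = (if pvTerminals.contains tok then s + 1 else s) := by
        simp only [pvIsTerm]; split_ifs <;> omega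
      show (k, (s :: _).getD (k - k).toNat 0) :: _ = pvSpecList (some tok :: ts) k s
      rw [hshift, hval, ih (k + 1) _]
      simp [pvSpecList]

-- ===== VERDICT (by name: the statement is the Claim_ definition above) =====
theorem sentence_ids_from_tokens_py_spec : Claim_equal_sentence_ids_from_tokens_py := by
  intro tokens _
  unfold Spec_sentence_ids_from_tokens_py sentence_ids_from_tokens_py sentence_ids_from_tokens_py_alt
  have hA := pv_A_loop tokens 0 0 PySem.Dict.empty (fun i _ => PySem.Dict.contains_empty i)
  have hB0 :
      (PySem.List.enumerate tokens).filterMap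
        (pvEmitB (tokens.scanl (fun acc t => acc + (if pvIsTerm t then 1 else 0)) 0))
      = (PySem.List.enumerate tokens).filterMap
        (fun p =>
          match p.2 with
          | none => none
          | some _ =>
            some (p.1, (tokens.scanl (fun acc t => acc + (if pvIsTerm t then 1 else 0)) (0 : Int)).getD (p.1 - 0).toNat 0)) := by
    apply List.filterMap_congr
    intro p _
    cases hsnd : p.2 with
    | none => simp [pvEmitB, hsnd]
    | some tok => simp [pvEmitB, hsnd]
  rw [hA, hB0, pv_B_loop tokens 0 0]
  simp [PySem.Dict.empty]
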